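-- pv_equiv track=rewrite | github.com/jjya1b2c3vu/- | test.py | check
-- ===== SOURCE A (Python) =====
-- from collections import deque
--
-- def man_dist(r1,c1,r2,c2):
--     return abs(r1-r2)+abs(c1-c2)
--
-- def get_participant(board):
--     participant = []
--     for i in range(5):
--         for j in range(5):
--             if board[i][j] == 'P':
--                 participant.append((i,j))
--     return participant
--
-- move = [(0,1),(1,0),(0,-1),(-1,0)]
--
-- def check(board):
--     participant = get_participant(board)
--     n = len(participant)
--
--     for i in range(1, n):
--         for j in range(i):
--             r1, c1 = participant[i]
--             r2, c2 = participant[j]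
--
--             #거리가 2 초과일 때
--             if man_dist(r1, c1, r2, c2) > 2:
--                 continue
--
--             #거리가 1일 때
--             queue = deque([])
--             for dr, dc in move:
--                 nr, nc = r1 + dr, c1 + dc
--                 if 0 <= nr < 5 and 0 <= nc < 5:
--                     if board[nr][nc] == 'X':
--                         queue.append((nr,nc,True))
--                     elif board[nr][nc] == 'P':
--                         return False
--                     else:
--                         queue.append((nr,nc,False))
--
--             #거리가 2일 때
--             while queue:
--                 r, c, flag = queue.popleft()
--                 for dr, dc in move:
--                     nr, nc = r + dr, c + dc
--                     if 0 <= nr < 5 and 0 <= nc < 5: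
--                         if (nr, nc) == (r1,c1):
--                             continue
--                         if board[nr][nc] == 'P' and flag == False:
--                             return False
--     return True
-- ===== SOURCE B (Python) =====
-- def check(board):
--     ps = [(i, j) for i in range(5) for j in range(5) if board[i][j] == 'P']
--     for k, (r1, c1) in enumerate(ps):
--         for (r2, c2) in ps[k + 1:]:
--             dr = abs(r1 - r2)
--             d = dr + abs(c1 - c2)
--             if d == 1:
--                 return False
--             if d == 2:
--                 if dr == 1:  # diagonal pair: two corner cells
--                     if board[r1][c2] != 'X' or board[r2][c1] != 'X':
--                         return False
--                 else:        # straight-line pair: the single middle cell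
--                     if board[(r1 + r2) // 2][(c1 + c2) // 2] != 'X':
--                         return False
--     return True
-- ===== Notes on version B (the rewrite author's own statement) =====
-- stated objective: simpler
-- what changed: Replaces the per-pair deque BFS over the 4-neighbourhood with a direct pairwise geometric test: Manhattan distance 1 fails, distance 2 fails iff some intermediate cell (the midpoint for straight pairs, either corner for diagonal pairs) is not 'X'.
import Mathlib
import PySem

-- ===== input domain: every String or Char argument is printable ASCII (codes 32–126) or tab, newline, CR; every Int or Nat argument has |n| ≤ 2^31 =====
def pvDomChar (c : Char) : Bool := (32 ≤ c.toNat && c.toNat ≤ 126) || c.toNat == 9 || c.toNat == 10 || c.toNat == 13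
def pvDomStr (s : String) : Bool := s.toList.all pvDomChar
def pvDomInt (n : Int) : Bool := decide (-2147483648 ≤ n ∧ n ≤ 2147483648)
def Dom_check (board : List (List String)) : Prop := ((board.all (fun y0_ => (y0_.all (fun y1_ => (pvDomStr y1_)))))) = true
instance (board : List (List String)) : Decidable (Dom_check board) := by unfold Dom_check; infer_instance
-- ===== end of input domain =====

-- B replaces A's per-pair deque BFS with a direct pairwise geometric test (distance-1 pairs,
-- and the intermediate cells of distance-2 pairs); same return value on every 5×5-indexable board.

-- ===== PORT A =====
-- board[i][j]; total via defaults — Pre_check guarantees all accessed indices are in range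
def at2 (board : List (List String)) (i j : Int) : String :=
  PySem.List.pyGetD (PySem.List.pyGetD board i []) j ""
def man_dist (r1 c1 r2 c2 : Int) : Int := |r1 - r2| + |c1 - c2|

def get_participant (board : List (List String)) : List (Int × Int) :=
  (PySem.List.pyRange 0 5 1).foldl (fun acc i =>
    (PySem.List.pyRange 0 5 1).foldl (fun acc j =>
      if (at2 board i j == "P") = true then acc ++ [(i, j)] else acc) acc) []

def move : List (Int × Int) := [(0,1),(1,0),(0,-1),(-1,0)]

-- inner `for dr, dc in move` of the while-loop body: true = Python hits `return False`
def bfsStep (board : List (List String)) (r1 c1 r c : Int) (flag : Bool) : Bool :=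
  move.any (fun e =>
    decide (0 ≤ r + e.1 ∧ r + e.1 < 5 ∧ 0 ≤ c + e.2 ∧ c + e.2 < 5) &&
      !(decide (r + e.1 = r1 ∧ c + e.2 = c1)) &&
      (at2 board (r + e.1) (c + e.2) == "P") && !flag)

-- `while queue:` — the body never appends, so it walks the initial queue
def bfsLoop (board : List (List String)) (r1 c1 : Int) : List (Int × Int × Bool) → Bool
  | [] => false
  | (r, c, flag) :: rest => bfsStep board r1 c1 r c flag || bfsLoop board r1 c1 rest

-- the `for dr, dc in move` queue-building loop; none = Python hits `return False`
def buildQueue (board : List (List String)) (r1 c1 : Int) :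
    List (Int × Int) → List (Int × Int × Bool) → Option (List (Int × Int × Bool))
  | [], acc => some acc
  | d :: rest, acc =>
    if 0 ≤ r1 + d.1 ∧ r1 + d.1 < 5 ∧ 0 ≤ c1 + d.2 ∧ c1 + d.2 < 5 then
      if at2 board (r1 + d.1) (c1 + d.2) == "X" then
        buildQueue board r1 c1 rest (acc ++ [(r1 + d.1, c1 + d.2, true)])
      else if at2 board (r1 + d.1) (c1 + d.2) == "P" then none
      else buildQueue board r1 c1 rest (acc ++ [(r1 + d.1, c1 + d.2, false)])
    else buildQueue board r1 c1 rest acc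

-- one iteration of the pair loop: true = Python hits `return False`
def pairBody (board : List (List String)) (r1 c1 r2 c2 : Int) : Bool :=
  if man_dist r1 c1 r2 c2 > 2 then false
  else
    match buildQueue board r1 c1 move [] with
    | none => true
    | some q => bfsLoop board r1 c1 q

def check (board : List (List String)) : Bool :=
  let participant := get_participant board
  let n : Int := participant.length
  !((PySem.List.pyRange 1 n 1).any fun i =>
    (PySem.List.pyRange 0 i 1).any fun j =>
      pairBody board
        (PySem.List.pyGetD participant i (0,0)).1 (PySem.List.pyGetD participant i (0,0)).2
        (PySem.List.pyGetD participant j (0,0)).1 (PySem.List.pyGetD participant j (0,0)).2)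

-- ===== PORT B =====
-- the comprehension [(i, j) for i in range(5) for j in range(5) if board[i][j] == 'P']
def bParts (board : List (List String)) : List (Int × Int) :=
  (PySem.List.pyRange 0 5 1).flatMap (fun i =>
    ((PySem.List.pyRange 0 5 1).filter (fun j => at2 board i j == "P")).map (fun j => (i, j)))

-- the per-pair test of B's inner loop: true = violation (`return False`)
def bViol (board : List (List String)) (r1 c1 r2 c2 : Int) : Bool :=
  let dr := |r1 - r2|
  let d := dr + |c1 - c2|
  if d == 1 then true
  else if d == 2 then
    if dr == 1 then !(at2 board r1 c2 == "X") || !(at2 board r2 c1 == "X")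
    else !(at2 board (PySem.Int.floordiv (r1 + r2) 2) (PySem.Int.floordiv (c1 + c2) 2) == "X")
  else false

-- `for k, (r1, c1) in enumerate(ps): for (r2, c2) in ps[k+1:]:` — head against tail, then recurse
def bLoop (board : List (List String)) : List (Int × Int) → Bool
  | [] => true
  | p :: rest =>
    if rest.any (fun q => bViol board p.1 p.2 q.1 q.2) then false else bLoop board rest

def check_alt (board : List (List String)) : Bool := bLoop board (bParts board)

-- ===== PRECONDITION & SPEC =====
-- Pre_check = exactly the boards A indexes without IndexError: 5 rows, each of the first 5 rows with 5 cells
def Pre_check (board : List (List String)) : Prop :=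
  5 ≤ board.length ∧ ∀ r ∈ board.take 5, 5 ≤ r.length
instance (board : List (List String)) : Decidable (Pre_check board) := by unfold Pre_check; infer_instance

def pvWitness_check : List (List String) :=
  [["P","X","X","X","X"],["X","X","X","X","X"],["X","X","X","X","P"],
   ["X","X","X","X","X"],["X","X","X","X","X"]]

def Spec_check (board : List (List String)) (out : Bool) : Prop := out = check_alt board
instance (board : List (List String)) (out : Bool) : Decidable (Spec_check board out) := by unfold Spec_check; infer_instance

-- ===== CLAIM (what is proved, stated in full; the proofs are below) =====
def Claim_equal_check : Prop := ∀ (board : List (List String)), Dom_check board → Pre_check board → Spec_check board (check board)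

-- ===== LEMMAS AND PROOFS =====

-- in-bounds predicate of the 5×5 grid
def inb (r c : Int) : Prop := 0 ≤ r ∧ r < 5 ∧ 0 ≤ c ∧ c < 5

-- what one outer-move iteration of A's neighbourhood exploration contributes
def gmove (board : List (List String)) (r1 c1 : Int) (d : Int × Int) : Bool :=
  decide (0 ≤ r1 + d.1 ∧ r1 + d.1 < 5 ∧ 0 ≤ c1 + d.2 ∧ c1 + d.2 < 5) &&
    (if at2 board (r1 + d.1) (c1 + d.2) == "X" then false
     else if at2 board (r1 + d.1) (c1 + d.2) == "P" then true
     else bfsStep board r1 c1 (r1 + d.1) (c1 + d.2) false)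

def detectB (board : List (List String)) (r1 c1 : Int) : Bool :=
  move.any (gmove board r1 c1)

lemma bfsLoop_append (b : List (List String)) (r1 c1 : Int) (acc : List (Int × Int × Bool))
    (x : Int × Int × Bool) :
    bfsLoop b r1 c1 (acc ++ [x]) = (bfsLoop b r1 c1 acc || bfsStep b r1 c1 x.1 x.2.1 x.2.2) := by
  induction acc with
  | nil => obtain ⟨r, c, f⟩ := x; simp [bfsLoop]
  | cons y t ih => obtain ⟨r, c, f⟩ := y; simp [bfsLoop, ih, Bool.or_assoc]

lemma buildQueue_run (b : List (List String)) (r1 c1 : Int) (mv : List (Int × Int))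
    (acc : List (Int × Int × Bool)) :
    (match buildQueue b r1 c1 mv acc with
      | none => true
      | some q => bfsLoop b r1 c1 q) = (bfsLoop b r1 c1 acc || mv.any (gmove b r1 c1)) := by
  induction mv generalizing acc with
  | nil => simp [buildQueue]
  | cons d rest ih =>
    simp only [buildQueue]
    split_ifs with hin hX hP
    · rw [ih, bfsLoop_append]
      simp [gmove, bfsStep, hin, hX, move]
    · simp [gmove, hin, hX, hP]
    · rw [ih, bfsLoop_append]
      simp [gmove, bfsStep, hin, hX, hP, Bool.or_assoc]
    · rw [ih]
      simp [gmove, hin]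

lemma pairBody_eq (b : List (List String)) (r1 c1 r2 c2 : Int) :
    pairBody b r1 c1 r2 c2 =
      if man_dist r1 c1 r2 c2 > 2 then false else detectB b r1 c1 := by
  unfold pairBody detectB
  split
  · rfl
  · have h := buildQueue_run b r1 c1 move []
    simpa [bfsLoop] using h

lemma get_participant_eq (b : List (List String)) : get_participant b = bParts b := by
  unfold get_participant bParts
  simp only [PySem.List.foldl_append_if]
  rw [show (fun (acc : List (Int × Int)) i => acc ++
      List.map (fun j => (i, j)) (List.filter (fun j => at2 b i j == "P") (PySem.List.pyRange 0 5 1)))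
    = (fun acc i => acc ++ (fun i => List.map (fun j => (i, j))
        (List.filter (fun j => at2 b i j == "P") (PySem.List.pyRange 0 5 1))) i) from rfl]
  rw [PySem.List.foldl_append_eq_flatMap]
  simp

lemma mem_bParts (b : List (List String)) (p : Int × Int) :
    p ∈ bParts b ↔ inb p.1 p.2 ∧ at2 b p.1 p.2 = "P" := by
  obtain ⟨r, c⟩ := p
  simp only [bParts, List.mem_flatMap, List.mem_map, List.mem_filter,
    PySem.List.mem_pyRange_one, inb, beq_iff_eq, Prod.mk.injEq]
  constructor
  · rintro ⟨i, hi, j, ⟨hj, hP⟩, rfl, rfl⟩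
    exact ⟨⟨hi.1, hi.2, hj.1, hj.2⟩, hP⟩
  · rintro ⟨⟨h1, h2, h3, h4⟩, hP⟩
    exact ⟨r, ⟨h1, h2⟩, c, ⟨⟨h3, h4⟩, hP⟩, rfl, rfl⟩

lemma detect_true_iff (b : List (List String)) (r1 c1 : Int) :
    detectB b r1 c1 = true ↔
      ∃ d ∈ move, inb (r1 + d.1) (c1 + d.2) ∧ at2 b (r1 + d.1) (c1 + d.2) ≠ "X" ∧
        (at2 b (r1 + d.1) (c1 + d.2) = "P" ∨
          ∃ e ∈ move, inb (r1 + d.1 + e.1) (c1 + d.2 + e.2) ∧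
            ¬(r1 + d.1 + e.1 = r1 ∧ c1 + d.2 + e.2 = c1) ∧
            at2 b (r1 + d.1 + e.1) (c1 + d.2 + e.2) = "P") := by
  unfold detectB
  rw [List.any_eq_true]
  refine exists_congr fun d => and_congr_right fun _ => ?_
  unfold gmove bfsStep
  split_ifs with hX hP
  · simp only [Bool.and_false]
    simp only [beq_iff_eq] at hX
    simp [hX]
  · simp only [beq_iff_eq] at hX hP
    simp [hP, inb]
  · simp only [beq_iff_eq] at hX hP
    simp only [Bool.and_eq_true, List.any_eq_true, decide_eq_true_eq, Bool.not_eq_true',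
      decide_eq_false_iff_not, beq_iff_eq, Bool.not_false, Bool.and_true, inb]
    constructor
    · rintro ⟨hin, e, he, ⟨h1, h2⟩, h3⟩
      exact ⟨hin, hX, Or.inr ⟨e, he, h1, h2, h3⟩⟩
    · rintro ⟨hin, -, hP' | ⟨e, he, h1, h2, h3⟩⟩
      · exact absurd hP' hP
      · exact ⟨hin, e, he, ⟨h1, h2⟩, h3⟩

lemma viol_true_iff (b : List (List String)) (r1 c1 r2 c2 : Int) :
    bViol b r1 c1 r2 c2 = true ↔
      (|r1 - r2| + |c1 - c2| = 1) ∨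
      (|r1 - r2| + |c1 - c2| = 2 ∧
        ((|r1 - r2| = 1 ∧ (at2 b r1 c2 ≠ "X" ∨ at2 b r2 c1 ≠ "X")) ∨
         (|r1 - r2| ≠ 1 ∧
           at2 b (PySem.Int.floordiv (r1 + r2) 2) (PySem.Int.floordiv (c1 + c2) 2) ≠ "X"))) := by
  simp only [bViol]
  split_ifs with h1 h2 h3
  · simp only [beq_iff_eq] at h1
    simp [h1]
  · simp only [beq_iff_eq] at h1 h2 h3
    simp only [Bool.or_eq_true, Bool.not_eq_true', beq_eq_false_iff_ne]
    constructor
    · intro h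
      exact Or.inr ⟨h2, Or.inl ⟨h3, h⟩⟩
    · rintro (h | ⟨-, ⟨-, h⟩ | ⟨hne, -⟩⟩)
      · exact absurd h h1
      · exact h
      · exact absurd h3 hne
  · simp only [beq_iff_eq] at h1 h2 h3
    simp only [Bool.not_eq_true', beq_eq_false_iff_ne]
    constructor
    · intro h
      exact Or.inr ⟨h2, Or.inr ⟨h3, h⟩⟩
    · rintro (h | ⟨-, ⟨hdr, -⟩ | ⟨-, h⟩⟩)
      · exact absurd h h1
      · exact absurd hdr h3
      · exact h
  · simp only [beq_iff_eq] at h1 h2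
    simp [h1, h2]

lemma viol_symm (b : List (List String)) (r1 c1 r2 c2 : Int) :
    bViol b r1 c1 r2 c2 = bViol b r2 c2 r1 c1 := by
  rw [Bool.eq_iff_iff, viol_true_iff, viol_true_iff,
    abs_sub_comm r2 r1, abs_sub_comm c2 c1, Int.add_comm r2 r1, Int.add_comm c2 c1]
  tauto

-- A's neighbourhood detection finds some violating participant cell
lemma bridge_fwd (b : List (List String)) (r1 c1 : Int) (h : detectB b r1 c1 = true) :
    ∃ r2 c2, inb r2 c2 ∧ at2 b r2 c2 = "P" ∧ bViol b r1 c1 r2 c2 = true := by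
  rw [detect_true_iff] at h
  obtain ⟨d, hd, hin, hX, hrest⟩ := h
  obtain ⟨d1, d2⟩ := d
  simp only [move, List.mem_cons, List.not_mem_nil, or_false, Prod.mk.injEq] at hd
  rcases hd with ⟨rfl, rfl⟩ | ⟨rfl, rfl⟩ | ⟨rfl, rfl⟩ | ⟨rfl, rfl⟩
  · rcases hrest with hP | ⟨e, he, hin2, hne, htP⟩
    · refine ⟨r1 + 0, c1 + 1, hin, hP, (viol_true_iff b r1 c1 (r1 + 0) (c1 + 1)).mpr (Or.inl (by simp only [Int.abs_eq_natAbs]; omega))⟩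
    · obtain ⟨e1, e2⟩ := e
      simp only [move, List.mem_cons, List.not_mem_nil, or_false, Prod.mk.injEq] at he
      rcases he with ⟨rfl, rfl⟩ | ⟨rfl, rfl⟩ | ⟨rfl, rfl⟩ | ⟨rfl, rfl⟩
      · refine ⟨r1 + 0 + 0, c1 + 1 + 1, hin2, htP, (viol_true_iff b r1 c1 (r1 + 0 + 0) (c1 + 1 + 1)).mpr (Or.inr ⟨by simp only [Int.abs_eq_natAbs]; omega, ?_⟩)⟩
        refine Or.inr ⟨by simp only [Int.abs_eq_natAbs]; omega, ?_⟩
        have m1 : PySem.Int.floordiv (r1 + (r1 + 0 + 0)) 2 = r1 + 0 := by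
          rw [PySem.Int.floordiv_eq_ediv_of_pos (by omega)]; omega
        have m2 : PySem.Int.floordiv (c1 + (c1 + 1 + 1)) 2 = c1 + 1 := by
          rw [PySem.Int.floordiv_eq_ediv_of_pos (by omega)]; omega
        rw [m1, m2]
        exact hX
      · refine ⟨r1 + 0 + 1, c1 + 1 + 0, hin2, htP, (viol_true_iff b r1 c1 (r1 + 0 + 1) (c1 + 1 + 0)).mpr (Or.inr ⟨by simp only [Int.abs_eq_natAbs]; omega, ?_⟩)⟩
        refine Or.inl ⟨by simp only [Int.abs_eq_natAbs]; omega, Or.inl ?_⟩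
        have hc : at2 b r1 (c1 + 1 + 0) = at2 b (r1 + 0) (c1 + 1) := by norm_num
        rw [hc]
        exact hX
      · exact absurd ⟨by omega, by omega⟩ hne
      · refine ⟨r1 + 0 + -1, c1 + 1 + 0, hin2, htP, (viol_true_iff b r1 c1 (r1 + 0 + -1) (c1 + 1 + 0)).mpr (Or.inr ⟨by simp only [Int.abs_eq_natAbs]; omega, ?_⟩)⟩
        refine Or.inl ⟨by simp only [Int.abs_eq_natAbs]; omega, Or.inl ?_⟩
        have hc : at2 b r1 (c1 + 1 + 0) = at2 b (r1 + 0) (c1 + 1) := by norm_num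
        rw [hc]
        exact hX
  · rcases hrest with hP | ⟨e, he, hin2, hne, htP⟩
    · refine ⟨r1 + 1, c1 + 0, hin, hP, (viol_true_iff b r1 c1 (r1 + 1) (c1 + 0)).mpr (Or.inl (by simp only [Int.abs_eq_natAbs]; omega))⟩
    · obtain ⟨e1, e2⟩ := e
      simp only [move, List.mem_cons, List.not_mem_nil, or_false, Prod.mk.injEq] at he
      rcases he with ⟨rfl, rfl⟩ | ⟨rfl, rfl⟩ | ⟨rfl, rfl⟩ | ⟨rfl, rfl⟩
      · refine ⟨r1 + 1 + 0, c1 + 0 + 1, hin2, htP, (viol_true_iff b r1 c1 (r1 + 1 + 0) (c1 + 0 + 1)).mpr (Or.inr ⟨by simp only [Int.abs_eq_natAbs]; omega, ?_⟩)⟩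
        refine Or.inl ⟨by simp only [Int.abs_eq_natAbs]; omega, Or.inr ?_⟩
        have hc : at2 b (r1 + 1 + 0) c1 = at2 b (r1 + 1) (c1 + 0) := by norm_num
        rw [hc]
        exact hX
      · refine ⟨r1 + 1 + 1, c1 + 0 + 0, hin2, htP, (viol_true_iff b r1 c1 (r1 + 1 + 1) (c1 + 0 + 0)).mpr (Or.inr ⟨by simp only [Int.abs_eq_natAbs]; omega, ?_⟩)⟩
        refine Or.inr ⟨by simp only [Int.abs_eq_natAbs]; omega, ?_⟩
        have m1 : PySem.Int.floordiv (r1 + (r1 + 1 + 1)) 2 = r1 + 1 := by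
          rw [PySem.Int.floordiv_eq_ediv_of_pos (by omega)]; omega
        have m2 : PySem.Int.floordiv (c1 + (c1 + 0 + 0)) 2 = c1 + 0 := by
          rw [PySem.Int.floordiv_eq_ediv_of_pos (by omega)]; omega
        rw [m1, m2]
        exact hX
      · refine ⟨r1 + 1 + 0, c1 + 0 + -1, hin2, htP, (viol_true_iff b r1 c1 (r1 + 1 + 0) (c1 + 0 + -1)).mpr (Or.inr ⟨by simp only [Int.abs_eq_natAbs]; omega, ?_⟩)⟩
        refine Or.inl ⟨by simp only [Int.abs_eq_natAbs]; omega, Or.inr ?_⟩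
        have hc : at2 b (r1 + 1 + 0) c1 = at2 b (r1 + 1) (c1 + 0) := by norm_num
        rw [hc]
        exact hX
      · exact absurd ⟨by omega, by omega⟩ hne
  · rcases hrest with hP | ⟨e, he, hin2, hne, htP⟩
    · refine ⟨r1 + 0, c1 + -1, hin, hP, (viol_true_iff b r1 c1 (r1 + 0) (c1 + -1)).mpr (Or.inl (by simp only [Int.abs_eq_natAbs]; omega))⟩
    · obtain ⟨e1, e2⟩ := e
      simp only [move, List.mem_cons, List.not_mem_nil, or_false, Prod.mk.injEq] at he
      rcases he with ⟨rfl, rfl⟩ | ⟨rfl, rfl⟩ | ⟨rfl, rfl⟩ | ⟨rfl, rfl⟩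
      · exact absurd ⟨by omega, by omega⟩ hne
      · refine ⟨r1 + 0 + 1, c1 + -1 + 0, hin2, htP, (viol_true_iff b r1 c1 (r1 + 0 + 1) (c1 + -1 + 0)).mpr (Or.inr ⟨by simp only [Int.abs_eq_natAbs]; omega, ?_⟩)⟩
        refine Or.inl ⟨by simp only [Int.abs_eq_natAbs]; omega, Or.inl ?_⟩
        have hc : at2 b r1 (c1 + -1 + 0) = at2 b (r1 + 0) (c1 + -1) := by norm_num
        rw [hc]
        exact hX
      · refine ⟨r1 + 0 + 0, c1 + -1 + -1, hin2, htP, (viol_true_iff b r1 c1 (r1 + 0 + 0) (c1 + -1 + -1)).mpr (Or.inr ⟨by simp only [Int.abs_eq_natAbs]; omega, ?_⟩)⟩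
        refine Or.inr ⟨by simp only [Int.abs_eq_natAbs]; omega, ?_⟩
        have m1 : PySem.Int.floordiv (r1 + (r1 + 0 + 0)) 2 = r1 + 0 := by
          rw [PySem.Int.floordiv_eq_ediv_of_pos (by omega)]; omega
        have m2 : PySem.Int.floordiv (c1 + (c1 + -1 + -1)) 2 = c1 + -1 := by
          rw [PySem.Int.floordiv_eq_ediv_of_pos (by omega)]; omega
        rw [m1, m2]
        exact hX
      · refine ⟨r1 + 0 + -1, c1 + -1 + 0, hin2, htP, (viol_true_iff b r1 c1 (r1 + 0 + -1) (c1 + -1 + 0)).mpr (Or.inr ⟨by simp only [Int.abs_eq_natAbs]; omega, ?_⟩)⟩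
        refine Or.inl ⟨by simp only [Int.abs_eq_natAbs]; omega, Or.inl ?_⟩
        have hc : at2 b r1 (c1 + -1 + 0) = at2 b (r1 + 0) (c1 + -1) := by norm_num
        rw [hc]
        exact hX
  · rcases hrest with hP | ⟨e, he, hin2, hne, htP⟩
    · refine ⟨r1 + -1, c1 + 0, hin, hP, (viol_true_iff b r1 c1 (r1 + -1) (c1 + 0)).mpr (Or.inl (by simp only [Int.abs_eq_natAbs]; omega))⟩
    · obtain ⟨e1, e2⟩ := e
      simp only [move, List.mem_cons, List.not_mem_nil, or_false, Prod.mk.injEq] at he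
      rcases he with ⟨rfl, rfl⟩ | ⟨rfl, rfl⟩ | ⟨rfl, rfl⟩ | ⟨rfl, rfl⟩
      · refine ⟨r1 + -1 + 0, c1 + 0 + 1, hin2, htP, (viol_true_iff b r1 c1 (r1 + -1 + 0) (c1 + 0 + 1)).mpr (Or.inr ⟨by simp only [Int.abs_eq_natAbs]; omega, ?_⟩)⟩
        refine Or.inl ⟨by simp only [Int.abs_eq_natAbs]; omega, Or.inr ?_⟩
        have hc : at2 b (r1 + -1 + 0) c1 = at2 b (r1 + -1) (c1 + 0) := by norm_num
        rw [hc]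
        exact hX
      · exact absurd ⟨by omega, by omega⟩ hne
      · refine ⟨r1 + -1 + 0, c1 + 0 + -1, hin2, htP, (viol_true_iff b r1 c1 (r1 + -1 + 0) (c1 + 0 + -1)).mpr (Or.inr ⟨by simp only [Int.abs_eq_natAbs]; omega, ?_⟩)⟩
        refine Or.inl ⟨by simp only [Int.abs_eq_natAbs]; omega, Or.inr ?_⟩
        have hc : at2 b (r1 + -1 + 0) c1 = at2 b (r1 + -1) (c1 + 0) := by norm_num
        rw [hc]
        exact hX
      · refine ⟨r1 + -1 + -1, c1 + 0 + 0, hin2, htP, (viol_true_iff b r1 c1 (r1 + -1 + -1) (c1 + 0 + 0)).mpr (Or.inr ⟨by simp only [Int.abs_eq_natAbs]; omega, ?_⟩)⟩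
        refine Or.inr ⟨by simp only [Int.abs_eq_natAbs]; omega, ?_⟩
        have m1 : PySem.Int.floordiv (r1 + (r1 + -1 + -1)) 2 = r1 + -1 := by
          rw [PySem.Int.floordiv_eq_ediv_of_pos (by omega)]; omega
        have m2 : PySem.Int.floordiv (c1 + (c1 + 0 + 0)) 2 = c1 + 0 := by
          rw [PySem.Int.floordiv_eq_ediv_of_pos (by omega)]; omega
        rw [m1, m2]
        exact hX


lemma detect_intro (b : List (List String)) (r1 c1 d1 d2 : Int) (hd : (d1, d2) ∈ move)
    (hin : inb (r1 + d1) (c1 + d2)) (hX : at2 b (r1 + d1) (c1 + d2) ≠ "X")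
    (hrest : at2 b (r1 + d1) (c1 + d2) = "P" ∨
      ∃ e1 e2, (e1, e2) ∈ move ∧ inb (r1 + d1 + e1) (c1 + d2 + e2) ∧
        ¬(r1 + d1 + e1 = r1 ∧ c1 + d2 + e2 = c1) ∧ at2 b (r1 + d1 + e1) (c1 + d2 + e2) = "P") :
    detectB b r1 c1 = true := by
  rw [detect_true_iff]
  refine ⟨(d1, d2), hd, hin, hX, ?_⟩
  rcases hrest with h | ⟨e1, e2, he, ha, hb, hc⟩
  · exact Or.inl h
  · exact Or.inr ⟨(e1, e2), he, ha, hb, hc⟩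

lemma detect_via (b : List (List String)) (r1 c1 d1 d2 e1 e2 : Int)
    (hd : (d1, d2) ∈ move) (he : (e1, e2) ∈ move)
    (hinm : inb (r1 + d1) (c1 + d2)) (hmX : at2 b (r1 + d1) (c1 + d2) ≠ "X")
    (hint : inb (r1 + d1 + e1) (c1 + d2 + e2)) (hne : ¬(r1 + d1 + e1 = r1 ∧ c1 + d2 + e2 = c1))
    (htP : at2 b (r1 + d1 + e1) (c1 + d2 + e2) = "P") :
    detectB b r1 c1 = true :=
  detect_intro b r1 c1 d1 d2 hd hinm hmX (Or.inr ⟨e1, e2, he, hint, hne, htP⟩)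

-- a violating pair is detected by A's neighbourhood exploration from its first endpoint
lemma bridge_bwd (b : List (List String)) (r1 c1 r2 c2 : Int)
    (h1 : inb r1 c1) (h2 : inb r2 c2) (hp : at2 b r2 c2 = "P")
    (hv : bViol b r1 c1 r2 c2 = true) :
    detectB b r1 c1 = true ∧ ¬ man_dist r1 c1 r2 c2 > 2 := by
  have hd2 : ¬ man_dist r1 c1 r2 c2 > 2 := by
    rcases (viol_true_iff b r1 c1 r2 c2).mp hv with h | ⟨h, -⟩ <;>
      simp only [man_dist] <;> omega
  refine ⟨?_, hd2⟩
  unfold inb at h1 h2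
  rcases (viol_true_iff b r1 c1 r2 c2).mp hv with hsum1 | ⟨hsum2, ⟨habs1, hcor⟩ | ⟨habsn, hmid⟩⟩
  · have hsplit : (r2 = r1 + 1 ∧ c2 = c1 + 0) ∨ (r2 = r1 + -1 ∧ c2 = c1 + 0) ∨ (r2 = r1 + 0 ∧ c2 = c1 + 1) ∨ (r2 = r1 + 0 ∧ c2 = c1 + -1) := by
      simp only [Int.abs_eq_natAbs] at hsum1; omega
    rcases hsplit with ⟨hr, hc⟩ | ⟨hr, hc⟩ | ⟨hr, hc⟩ | ⟨hr, hc⟩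
    · have hcell : at2 b (r1 + 1) (c1 + 0) = at2 b r2 c2 := by
        rw [show (r1 + 1 : Int) = r2 from by omega, show (c1 + 0 : Int) = c2 from by omega]
      exact detect_intro b r1 c1 1 0 (by simp [move]) (by unfold inb; omega)
        (by rw [hcell, hp]; decide) (Or.inl (by rw [hcell]; exact hp))
    · have hcell : at2 b (r1 + -1) (c1 + 0) = at2 b r2 c2 := by
        rw [show (r1 + -1 : Int) = r2 from by omega, show (c1 + 0 : Int) = c2 from by omega]
      exact detect_intro b r1 c1 (-1) 0 (by simp [move]) (by unfold inb; omega)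
        (by rw [hcell, hp]; decide) (Or.inl (by rw [hcell]; exact hp))
    · have hcell : at2 b (r1 + 0) (c1 + 1) = at2 b r2 c2 := by
        rw [show (r1 + 0 : Int) = r2 from by omega, show (c1 + 1 : Int) = c2 from by omega]
      exact detect_intro b r1 c1 0 1 (by simp [move]) (by unfold inb; omega)
        (by rw [hcell, hp]; decide) (Or.inl (by rw [hcell]; exact hp))
    · have hcell : at2 b (r1 + 0) (c1 + -1) = at2 b r2 c2 := by
        rw [show (r1 + 0 : Int) = r2 from by omega, show (c1 + -1 : Int) = c2 from by omega]
      exact detect_intro b r1 c1 0 (-1) (by simp [move]) (by unfold inb; omega)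
        (by rw [hcell, hp]; decide) (Or.inl (by rw [hcell]; exact hp))
  · have hsplit : (r2 = r1 + 1 ∧ c2 = c1 + 1) ∨ (r2 = r1 + 1 ∧ c2 = c1 + -1) ∨ (r2 = r1 + -1 ∧ c2 = c1 + 1) ∨ (r2 = r1 + -1 ∧ c2 = c1 + -1) := by
      simp only [Int.abs_eq_natAbs] at hsum2 habs1; omega
    rcases hsplit with ⟨hr, hc⟩ | ⟨hr, hc⟩ | ⟨hr, hc⟩ | ⟨hr, hc⟩ <;> rcases hcor with hA | hB
    · have hq : at2 b (r1 + 0) (c1 + 1) = at2 b r1 c2 := by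
        rw [show (r1 + 0 : Int) = r1 from by omega, show (c1 + 1 : Int) = c2 from by omega]
      have hqq : at2 b (r1 + 0 + 1) (c1 + 1 + 0) = at2 b r2 c2 := by
        rw [show (r1 + 0 + 1 : Int) = r2 from by omega, show (c1 + 1 + 0 : Int) = c2 from by omega]
      exact detect_via b r1 c1 0 1 1 0 (by simp [move]) (by simp [move])
        (by unfold inb; omega) (by rw [hq]; exact hA) (by unfold inb; omega) (by omega)
        (by rw [hqq]; exact hp)
    · have hq : at2 b (r1 + 1) (c1 + 0) = at2 b r2 c1 := by
        rw [show (r1 + 1 : Int) = r2 from by omega, show (c1 + 0 : Int) = c1 from by omega]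
      have hqq : at2 b (r1 + 1 + 0) (c1 + 0 + 1) = at2 b r2 c2 := by
        rw [show (r1 + 1 + 0 : Int) = r2 from by omega, show (c1 + 0 + 1 : Int) = c2 from by omega]
      exact detect_via b r1 c1 1 0 0 1 (by simp [move]) (by simp [move])
        (by unfold inb; omega) (by rw [hq]; exact hB) (by unfold inb; omega) (by omega)
        (by rw [hqq]; exact hp)
    · have hq : at2 b (r1 + 0) (c1 + -1) = at2 b r1 c2 := by
        rw [show (r1 + 0 : Int) = r1 from by omega, show (c1 + -1 : Int) = c2 from by omega]
      have hqq : at2 b (r1 + 0 + 1) (c1 + -1 + 0) = at2 b r2 c2 := by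
        rw [show (r1 + 0 + 1 : Int) = r2 from by omega, show (c1 + -1 + 0 : Int) = c2 from by omega]
      exact detect_via b r1 c1 0 (-1) 1 0 (by simp [move]) (by simp [move])
        (by unfold inb; omega) (by rw [hq]; exact hA) (by unfold inb; omega) (by omega)
        (by rw [hqq]; exact hp)
    · have hq : at2 b (r1 + 1) (c1 + 0) = at2 b r2 c1 := by
        rw [show (r1 + 1 : Int) = r2 from by omega, show (c1 + 0 : Int) = c1 from by omega]
      have hqq : at2 b (r1 + 1 + 0) (c1 + 0 + -1) = at2 b r2 c2 := by
        rw [show (r1 + 1 + 0 : Int) = r2 from by omega, show (c1 + 0 + -1 : Int) = c2 from by omega]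
      exact detect_via b r1 c1 1 0 0 (-1) (by simp [move]) (by simp [move])
        (by unfold inb; omega) (by rw [hq]; exact hB) (by unfold inb; omega) (by omega)
        (by rw [hqq]; exact hp)
    · have hq : at2 b (r1 + 0) (c1 + 1) = at2 b r1 c2 := by
        rw [show (r1 + 0 : Int) = r1 from by omega, show (c1 + 1 : Int) = c2 from by omega]
      have hqq : at2 b (r1 + 0 + -1) (c1 + 1 + 0) = at2 b r2 c2 := by
        rw [show (r1 + 0 + -1 : Int) = r2 from by omega, show (c1 + 1 + 0 : Int) = c2 from by omega]
      exact detect_via b r1 c1 0 1 (-1) 0 (by simp [move]) (by simp [move])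
        (by unfold inb; omega) (by rw [hq]; exact hA) (by unfold inb; omega) (by omega)
        (by rw [hqq]; exact hp)
    · have hq : at2 b (r1 + -1) (c1 + 0) = at2 b r2 c1 := by
        rw [show (r1 + -1 : Int) = r2 from by omega, show (c1 + 0 : Int) = c1 from by omega]
      have hqq : at2 b (r1 + -1 + 0) (c1 + 0 + 1) = at2 b r2 c2 := by
        rw [show (r1 + -1 + 0 : Int) = r2 from by omega, show (c1 + 0 + 1 : Int) = c2 from by omega]
      exact detect_via b r1 c1 (-1) 0 0 1 (by simp [move]) (by simp [move])
        (by unfold inb; omega) (by rw [hq]; exact hB) (by unfold inb; omega) (by omega)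
        (by rw [hqq]; exact hp)
    · have hq : at2 b (r1 + 0) (c1 + -1) = at2 b r1 c2 := by
        rw [show (r1 + 0 : Int) = r1 from by omega, show (c1 + -1 : Int) = c2 from by omega]
      have hqq : at2 b (r1 + 0 + -1) (c1 + -1 + 0) = at2 b r2 c2 := by
        rw [show (r1 + 0 + -1 : Int) = r2 from by omega, show (c1 + -1 + 0 : Int) = c2 from by omega]
      exact detect_via b r1 c1 0 (-1) (-1) 0 (by simp [move]) (by simp [move])
        (by unfold inb; omega) (by rw [hq]; exact hA) (by unfold inb; omega) (by omega)
        (by rw [hqq]; exact hp)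
    · have hq : at2 b (r1 + -1) (c1 + 0) = at2 b r2 c1 := by
        rw [show (r1 + -1 : Int) = r2 from by omega, show (c1 + 0 : Int) = c1 from by omega]
      have hqq : at2 b (r1 + -1 + 0) (c1 + 0 + -1) = at2 b r2 c2 := by
        rw [show (r1 + -1 + 0 : Int) = r2 from by omega, show (c1 + 0 + -1 : Int) = c2 from by omega]
      exact detect_via b r1 c1 (-1) 0 0 (-1) (by simp [move]) (by simp [move])
        (by unfold inb; omega) (by rw [hq]; exact hB) (by unfold inb; omega) (by omega)
        (by rw [hqq]; exact hp)
  · have hsplit : (r2 = r1 + 0 ∧ c2 = c1 + 2) ∨ (r2 = r1 + 0 ∧ c2 = c1 + -2) ∨ (r2 = r1 + 2 ∧ c2 = c1 + 0) ∨ (r2 = r1 + -2 ∧ c2 = c1 + 0) := by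
      simp only [Int.abs_eq_natAbs] at hsum2 habsn; omega
    rcases hsplit with ⟨hr, hc⟩ | ⟨hr, hc⟩ | ⟨hr, hc⟩ | ⟨hr, hc⟩
    · have m1 : PySem.Int.floordiv (r1 + r2) 2 = r1 + 0 := by
        rw [PySem.Int.floordiv_eq_ediv_of_pos (by omega)]; omega
      have m2 : PySem.Int.floordiv (c1 + c2) 2 = c1 + 1 := by
        rw [PySem.Int.floordiv_eq_ediv_of_pos (by omega)]; omega
      rw [m1, m2] at hmid
      have hqq : at2 b (r1 + 0 + 0) (c1 + 1 + 1) = at2 b r2 c2 := by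
        rw [show (r1 + 0 + 0 : Int) = r2 from by omega, show (c1 + 1 + 1 : Int) = c2 from by omega]
      exact detect_via b r1 c1 0 1 0 1 (by simp [move]) (by simp [move])
        (by unfold inb; omega) hmid (by unfold inb; omega) (by omega)
        (by rw [hqq]; exact hp)
    · have m1 : PySem.Int.floordiv (r1 + r2) 2 = r1 + 0 := by
        rw [PySem.Int.floordiv_eq_ediv_of_pos (by omega)]; omega
      have m2 : PySem.Int.floordiv (c1 + c2) 2 = c1 + -1 := by
        rw [PySem.Int.floordiv_eq_ediv_of_pos (by omega)]; omega
      rw [m1, m2] at hmid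
      have hqq : at2 b (r1 + 0 + 0) (c1 + -1 + -1) = at2 b r2 c2 := by
        rw [show (r1 + 0 + 0 : Int) = r2 from by omega, show (c1 + -1 + -1 : Int) = c2 from by omega]
      exact detect_via b r1 c1 0 (-1) 0 (-1) (by simp [move]) (by simp [move])
        (by unfold inb; omega) hmid (by unfold inb; omega) (by omega)
        (by rw [hqq]; exact hp)
    · have m1 : PySem.Int.floordiv (r1 + r2) 2 = r1 + 1 := by
        rw [PySem.Int.floordiv_eq_ediv_of_pos (by omega)]; omega
      have m2 : PySem.Int.floordiv (c1 + c2) 2 = c1 + 0 := by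
        rw [PySem.Int.floordiv_eq_ediv_of_pos (by omega)]; omega
      rw [m1, m2] at hmid
      have hqq : at2 b (r1 + 1 + 1) (c1 + 0 + 0) = at2 b r2 c2 := by
        rw [show (r1 + 1 + 1 : Int) = r2 from by omega, show (c1 + 0 + 0 : Int) = c2 from by omega]
      exact detect_via b r1 c1 1 0 1 0 (by simp [move]) (by simp [move])
        (by unfold inb; omega) hmid (by unfold inb; omega) (by omega)
        (by rw [hqq]; exact hp)
    · have m1 : PySem.Int.floordiv (r1 + r2) 2 = r1 + -1 := by
        rw [PySem.Int.floordiv_eq_ediv_of_pos (by omega)]; omega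
      have m2 : PySem.Int.floordiv (c1 + c2) 2 = c1 + 0 := by
        rw [PySem.Int.floordiv_eq_ediv_of_pos (by omega)]; omega
      rw [m1, m2] at hmid
      have hqq : at2 b (r1 + -1 + -1) (c1 + 0 + 0) = at2 b r2 c2 := by
        rw [show (r1 + -1 + -1 : Int) = r2 from by omega, show (c1 + 0 + 0 : Int) = c2 from by omega]
      exact detect_via b r1 c1 (-1) 0 (-1) 0 (by simp [move]) (by simp [move])
        (by unfold inb; omega) hmid (by unfold inb; omega) (by omega)
        (by rw [hqq]; exact hp)

lemma viol_ne (b : List (List String)) (r1 c1 r2 c2 : Int)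
    (hv : bViol b r1 c1 r2 c2 = true) : ¬(r1 = r2 ∧ c1 = c2) := by
  rintro ⟨rfl, rfl⟩
  rw [viol_true_iff] at hv
  simp only [Int.abs_eq_natAbs] at hv
  rcases hv with h | ⟨h, -⟩ <;> omega

lemma bLoop_true_iff (b : List (List String)) (l : List (Int × Int)) :
    bLoop b l = true ↔ l.Pairwise (fun p q => bViol b p.1 p.2 q.1 q.2 = false) := by
  induction l with
  | nil => simp [bLoop]
  | cons p rest ih =>
    unfold bLoop
    split_ifs with h
    · rw [List.any_eq_true] at h
      obtain ⟨q, hq, hv⟩ := h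
      simp only [false_iff, List.pairwise_cons, not_and]
      intro hall
      exact absurd (hall q hq) (by simp [hv])
    · rw [ih]
      simp only [List.pairwise_cons, iff_and_self]
      intro _ q hq
      have h2 : ∀ a c, (a, c) ∈ rest → bViol b p.1 p.2 a c = false := by simpa using h
      have h3 := h2 q.1 q.2 (by rw [Prod.mk.eta]; exact hq)
      exact h3

lemma outer_any_true_iff (l : List (Int × Int)) (F : (Int × Int) → (Int × Int) → Bool) :
    (((PySem.List.pyRange 1 (l.length : Int) 1).any fun i =>
      (PySem.List.pyRange 0 i 1).any fun j =>
        F (PySem.List.pyGetD l i (0,0)) (PySem.List.pyGetD l j (0,0))) = true)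
    ↔ ∃ i j : Nat, j < i ∧ i < l.length ∧ F (l.getD i (0,0)) (l.getD j (0,0)) = true := by
  have conv : ∀ (k : Int), 0 ≤ k → k < (l.length : Int) →
      PySem.List.pyGetD l k ((0:Int),(0:Int)) = l.getD k.toNat ((0:Int),(0:Int)) := by
    intro k hk0 hk
    rw [PySem.List.pyGetD_eq_getElem _ _ hk0 (by simpa using hk)]
    rw [List.getD_eq_getElem _ _ (by omega)]
  simp only [List.any_eq_true, PySem.List.mem_pyRange_one]
  constructor
  · rintro ⟨i, ⟨h1i, hin⟩, j, ⟨h0j, hji⟩, hF⟩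
    refine ⟨i.toNat, j.toNat, by omega, by omega, ?_⟩
    rw [conv i (by omega) hin, conv j h0j (by omega)] at hF
    exact hF
  · rintro ⟨i, j, hji, hi, hF⟩
    refine ⟨(i : Int), ⟨by omega, by exact_mod_cast hi⟩, (j : Int), ⟨by omega, by exact_mod_cast hji⟩, ?_⟩
    rw [conv (i : Int) (by omega) (by exact_mod_cast hi), conv (j : Int) (by omega) (by omega)]
    simpa using hF

-- ===== VERDICT (by name: the statement is the Claim_ definition above) =====
theorem check_spec : Claim_equal_check := by
  intro board _ _
  unfold Spec_check
  have hmem := mem_bParts board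
  set l := bParts board with hl
  have hform : check board =
      !((PySem.List.pyRange 1 ((l.length : Nat) : Int) 1).any fun i =>
        (PySem.List.pyRange 0 i 1).any fun j =>
          (fun p q : Int × Int => pairBody board p.1 p.2 q.1 q.2)
            (PySem.List.pyGetD l i ((0 : Int), (0 : Int)))
            (PySem.List.pyGetD l j ((0 : Int), (0 : Int)))) := by
    simp only [check, get_participant_eq, hl]
  have houter := outer_any_true_iff l (fun p q : Int × Int => pairBody board p.1 p.2 q.1 q.2)
  have hkey : (∃ i j : Nat, j < i ∧ i < l.length ∧
      (fun p q : Int × Int => pairBody board p.1 p.2 q.1 q.2)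
        (l.getD i ((0 : Int), (0 : Int))) (l.getD j ((0 : Int), (0 : Int))) = true) ↔
      ¬ l.Pairwise (fun p q => bViol board p.1 p.2 q.1 q.2 = false) := by
    constructor
    · rintro ⟨i, j, hji, hi, hpb⟩
      simp only at hpb
      rw [pairBody_eq] at hpb
      split_ifs at hpb with hdist
      obtain ⟨r2, c2, hin2, hP2, hv⟩ := bridge_fwd board _ _ hpb
      have htmem : ((r2, c2) : Int × Int) ∈ l := (hmem (r2, c2)).mpr ⟨hin2, hP2⟩
      obtain ⟨k, hk, hkeq⟩ := List.mem_iff_getElem.mp htmem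
      have hgi : l.getD i ((0 : Int), (0 : Int)) = l[i] := List.getD_eq_getElem l _ hi
      have hne : (r2, c2) ≠ l.getD i ((0 : Int), (0 : Int)) := by
        have h0 := viol_ne board _ _ r2 c2 hv
        intro hq
        exact h0 ⟨by rw [← hq], by rw [← hq]⟩
      intro hpw
      rw [List.pairwise_iff_getElem] at hpw
      rcases lt_trichotomy k i with hki | rfl | hik
      · have hw := hpw k i hk hi hki
        rw [hkeq, ← hgi] at hw
        rw [← viol_symm] at hv
        rw [hw] at hv
        exact absurd hv (by simp)
      · exact hne (by rw [hgi, hkeq])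
      · have hw := hpw i k hi hk hik
        rw [hkeq, ← hgi] at hw
        rw [hw] at hv
        exact absurd hv (by simp)
    · intro hnp
      rw [List.pairwise_iff_getElem] at hnp
      push Not at hnp
      obtain ⟨a, c, ha, hc, hac, hv⟩ := hnp
      rw [Bool.ne_false_iff] at hv
      have hmema : l[a] ∈ l := List.getElem_mem ha
      have hmemc : l[c] ∈ l := List.getElem_mem hc
      obtain ⟨hina, hPa⟩ := (hmem l[a]).mp hmema
      obtain ⟨hinc, hPc⟩ := (hmem l[c]).mp hmemc
      rw [viol_symm] at hv
      obtain ⟨hdet, hdist⟩ := bridge_bwd board l[c].1 l[c].2 l[a].1 l[a].2 hinc hina hPa hv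
      refine ⟨c, a, hac, hc, ?_⟩
      simp only
      rw [List.getD_eq_getElem l _ hc, List.getD_eq_getElem l _ ha, pairBody_eq, if_neg hdist]
      exact hdet
  rw [hform]
  show _ = bLoop board l
  cases hc : ((PySem.List.pyRange 1 ((l.length : Nat) : Int) 1).any fun i =>
      (PySem.List.pyRange 0 i 1).any fun j =>
        (fun p q : Int × Int => pairBody board p.1 p.2 q.1 q.2)
          (PySem.List.pyGetD l i ((0 : Int), (0 : Int)))
          (PySem.List.pyGetD l j ((0 : Int), (0 : Int)))) with
  | false =>
    have hnex := (not_iff_not.mpr houter).mp (by simp [hc])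
    have hpw : l.Pairwise (fun p q => bViol board p.1 p.2 q.1 q.2 = false) := by
      by_contra hnp
      exact hnex (hkey.mpr hnp)
    rw [(bLoop_true_iff board l).mpr hpw]
    rfl
  | true =>
    have hnp := hkey.mp (houter.mp hc)
    have : bLoop board l ≠ true := fun ht => hnp ((bLoop_true_iff board l).mp ht)
    simp [Bool.not_eq_true] at this
    rw [this]
    rfl
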